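-- pv_equiv track=rewrite | github.com/halfbrained/cuda_snippets | dlg_search.py | fuzzy
-- ===== SOURCE A (Python) =====
-- def fuzzy(sub: str, text: str):
--     """Fuzzy search like in ST3
--
--     :return: rating of search
--     """
--     ln = len(sub)
--     rating = 0
--     last = -1
--     for i in range(ln):
--         # try find pair
--         if ln >= 2 and i < ln:
--             pr = sub[i:] if ln == 2 else sub[i:i+2]
--             f = text.find(pr, last+1)
--             if f != -1:
--                 rating += 1000 - f
--                 last = f
--             # try find chr
--             else:
--                 f = text.find(sub[i], last+1)
--                 if f != -1:
--                     rating += 500 - f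
--                     last = f
--                 else:
--                     return 0
--         else:
--             f = text.find(sub[i], last+1)
--             if f != -1:
--                 rating += 500 - f
--                 last = f
--     return rating
-- ===== SOURCE B (Python) =====
-- def fuzzy(sub: str, text: str):
--     """Fuzzy search like in ST3 (index-based re-implementation).
--
--     :return: rating of search
--     """
--     n = len(sub)
--     # one pass over text: positions of every 1-char and 2-char substring
--     pos = {}
--     for j in range(len(text)):
--         pos.setdefault(text[j], []).append(j)
--         bg = text[j:j + 2]
--         if len(bg) == 2:
--             pos.setdefault(bg, []).append(j)
--
--     def first_ge(lst, lo):
--         # first element of the sorted list lst that is >= lo, else -1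
--         a, b = 0, len(lst)
--         while a < b:
--             m = (a + b) // 2
--             if lst[m] < lo:
--                 a = m + 1
--             else:
--                 b = m
--         return lst[a] if a < len(lst) else -1
--
--     rating = 0
--     last = -1
--     for i in range(n):
--         if n >= 2:
--             f = first_ge(pos.get(sub[i:i + 2], []), last + 1)
--             if f != -1:
--                 rating += 1000 - f
--                 last = f
--                 continue
--             f = first_ge(pos.get(sub[i], []), last + 1)
--             if f != -1:
--                 rating += 500 - f
--                 last = f
--             else:
--                 return 0
--         else:
--             f = first_ge(pos.get(sub[i], []), last + 1)
--             if f != -1: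
--                 rating += 500 - f
--                 last = f
--     return rating
-- ===== Notes on version B (the rewrite author's own statement) =====
-- stated objective: faster
-- what changed: B builds, in one pass over text, a dictionary mapping every 1- and 2-character substring to its sorted list of positions, then answers each of A's text.find(pr, last+1) scans with a binary search over that list.
import Mathlib
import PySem

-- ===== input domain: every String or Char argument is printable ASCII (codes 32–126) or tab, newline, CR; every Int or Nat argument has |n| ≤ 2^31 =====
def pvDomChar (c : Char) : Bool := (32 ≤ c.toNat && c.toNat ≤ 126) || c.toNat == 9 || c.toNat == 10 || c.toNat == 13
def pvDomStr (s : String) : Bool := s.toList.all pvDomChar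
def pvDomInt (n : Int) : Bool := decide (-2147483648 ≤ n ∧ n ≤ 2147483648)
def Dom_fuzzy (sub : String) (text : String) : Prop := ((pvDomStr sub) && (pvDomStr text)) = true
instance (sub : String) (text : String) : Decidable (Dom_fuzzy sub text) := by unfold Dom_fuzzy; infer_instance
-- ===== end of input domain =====

-- B replaces A's repeated text.find scans by a one-pass index of 1- and 2-char substring
-- positions plus a binary search per step (objective: faster).

-- sub[i] / text[j] read as a 1-character string; the index is always in range where the
-- ports use it, so the `none` (IndexError) case is never taken.
def pvStrAt (xs : List Char) (i : Int) : List Char :=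
  (PySem.List.pyGet? xs i).elim [] (fun c => [c])

-- ===== PORT A =====
-- the `for i in range(ln)` loop of A, over the remaining indices, state (rating, last)
def fuzzyLoopA (subL textL : List Char) (ln : Int) : List Int → Int → Int → Int
  | [], rating, _ => rating
  | i :: rest, rating, last =>
    if ln ≥ 2 ∧ i < ln then
      -- pr = sub[i:] if ln == 2 else sub[i:i+2]
      let pr := if ln = 2 then PySem.List.slice subL (some i) none
                else PySem.List.slice subL (some i) (some (i + 2))
      let f := PySem.Chars.findFrom textL pr (last + 1)
      if f ≠ -1 then fuzzyLoopA subL textL ln rest (rating + (1000 - f)) f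
      else
        let f2 := PySem.Chars.findFrom textL (pvStrAt subL i) (last + 1)
        if f2 ≠ -1 then fuzzyLoopA subL textL ln rest (rating + (500 - f2)) f2
        else 0
    else
      let f := PySem.Chars.findFrom textL (pvStrAt subL i) (last + 1)
      if f ≠ -1 then fuzzyLoopA subL textL ln rest (rating + (500 - f)) f
      else fuzzyLoopA subL textL ln rest rating last

def fuzzy (sub : String) (text : String) : Int :=
  let subL := sub.toList
  let ln : Int := subL.length
  fuzzyLoopA subL text.toList ln (PySem.List.pyRange 0 ln) 0 (-1)

-- ===== PORT B =====
-- `pos.setdefault(key, []).append(j)` is exactly Dict.modify key [] (· ++ [j])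
def buildPos (textL : List Char) : PySem.Dict (List Char) (List Int) :=
  (PySem.List.pyRange 0 (textL.length : Int)).foldl (fun d j =>
    let d1 := d.modify (pvStrAt textL j) [] (fun l => l ++ [j])
    let bg := PySem.List.slice textL (some j) (some (j + 2))
    if bg.length = 2 then d1.modify bg [] (fun l => l ++ [j]) else d1)
    PySem.Dict.empty

-- the `while a < b` binary-search loop of first_ge (lst[m] is in range: m < b ≤ len)
def firstGeGo (lst : List Int) (lo : Int) (a b : Nat) : Nat :=
  if _h : a < b then
    let m := (a + b) / 2
    if lst.getD m 0 < lo then firstGeGo lst lo (m + 1) b else firstGeGo lst lo a m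
  else a
termination_by b - a
decreasing_by
  · exact Nat.sub_lt_sub_left _h (Nat.lt_succ_of_le (Nat.le_div_iff_mul_le Nat.two_pos |>.mpr
      ((Nat.mul_two a).le.trans (Nat.add_le_add_left _h.le a))))
  · exact Nat.sub_lt_sub_right (Nat.le_div_iff_mul_le Nat.two_pos |>.mpr
      ((Nat.mul_two a).le.trans (Nat.add_le_add_left _h.le a)))
      ((Nat.div_lt_iff_lt_mul Nat.two_pos).mpr
      ((Nat.add_lt_add_right _h b).trans_eq (Nat.mul_two b).symm))

def firstGe (lst : List Int) (lo : Int) : Int :=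
  let a := firstGeGo lst lo 0 lst.length
  if h : a < lst.length then lst[a] else -1

-- the `for i in range(n)` loop of B, state (rating, last)
def fuzzyLoopB (subL : List Char) (pos : PySem.Dict (List Char) (List Int)) (n : Int) :
    List Int → Int → Int → Int
  | [], rating, _ => rating
  | i :: rest, rating, last =>
    if n ≥ 2 then
      let f := firstGe (pos.getD (PySem.List.slice subL (some i) (some (i + 2))) []) (last + 1)
      if f ≠ -1 then fuzzyLoopB subL pos n rest (rating + (1000 - f)) f
      else
        let f2 := firstGe (pos.getD (pvStrAt subL i) []) (last + 1)
        if f2 ≠ -1 then fuzzyLoopB subL pos n rest (rating + (500 - f2)) f2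
        else 0
    else
      let f := firstGe (pos.getD (pvStrAt subL i) []) (last + 1)
      if f ≠ -1 then fuzzyLoopB subL pos n rest (rating + (500 - f)) f
      else fuzzyLoopB subL pos n rest rating last

def fuzzy_alt (sub : String) (text : String) : Int :=
  let subL := sub.toList
  let n : Int := subL.length
  let pos := buildPos text.toList
  fuzzyLoopB subL pos n (PySem.List.pyRange 0 n) 0 (-1)

-- ===== PRECONDITION & SPEC =====
def Spec_fuzzy (sub : String) (text : String) (out : Int) : Prop := out = fuzzy_alt sub text
instance (sub : String) (text : String) (out : Int) : Decidable (Spec_fuzzy sub text out) := by unfold Spec_fuzzy; infer_instance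

-- ===== CLAIM (what is proved, stated in full; the proofs are below) =====
def Claim_equal_fuzzy : Prop := ∀ (sub : String) (text : String), Dom_fuzzy sub text → Spec_fuzzy sub text (fuzzy sub text)

-- ===== LEMMAS AND PROOFS =====

-- positions (as Ints, increasing) where pattern p occurs in the first m characters of textL
def occUpTo (textL p : List Char) (m : Nat) : List Int :=
  ((List.range m).filter (fun j => decide (p <+: textL.drop j))).map (fun j : Nat => (j : Int))

theorem mem_occUpTo (textL p : List Char) (m : Nat) (x : Int) :
    x ∈ occUpTo textL p m ↔ ∃ j : Nat, x = (j : Int) ∧ j < m ∧ p <+: textL.drop j := by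
  simp [occUpTo, List.mem_filter, List.mem_range, eq_comm]
  tauto

theorem occUpTo_sorted (textL p : List Char) (m : Nat) :
    (occUpTo textL p m).Pairwise (· < ·) := by
  unfold occUpTo
  rw [List.pairwise_map]
  refine ((List.pairwise_lt_range).filter _).imp ?_
  intro a b h
  exact_mod_cast h

theorem pvStrAt_natCast (xs : List Char) (m : Nat) (hm : m < xs.length) :
    pvStrAt xs (m : Int) = [xs[m]] := by
  simp [pvStrAt, PySem.List.pyGet?_natCast, List.getElem?_eq_getElem hm]

theorem occUpTo_succ (textL p : List Char) (m : Nat) :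
    occUpTo textL p (m + 1) =
      occUpTo textL p m ++ (if p <+: textL.drop m then [(m : Int)] else []) := by
  unfold occUpTo
  rw [List.range_succ, List.filter_append, List.map_append]
  congr 1
  by_cases h : p <+: textL.drop m <;> simp [h]

-- one fold step of buildPos, evaluated at a query key p of length 1 or 2
theorem buildPos_step (textL : List Char) (d : PySem.Dict (List Char) (List Int)) (m : Nat)
    (hm : m < textL.length) (p : List Char) (hp : p.length = 1 ∨ p.length = 2) :
    ((fun (d : PySem.Dict (List Char) (List Int)) (j : Int) =>
      let d1 := d.modify (pvStrAt textL j) [] (fun l => l ++ [j])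
      let bg := PySem.List.slice textL (some j) (some (j + 2))
      if bg.length = 2 then d1.modify bg [] (fun l => l ++ [j]) else d1) d (m : Int)).getD p []
    = d.getD p [] ++ (if p <+: textL.drop m then [(m : Int)] else []) := by
  have hk1 : pvStrAt textL (m : Int) = [textL[m]] := pvStrAt_natCast textL m hm
  have hbg : PySem.List.slice textL (some (m : Int)) (some ((m : Int) + 2)) =
      (textL.drop m).take 2 := by
    have := PySem.List.slice_natCast_add textL m 2
    norm_num at this
    exact this
  have hdropcons : textL.drop m = textL[m] :: textL.drop (m + 1) :=
    List.drop_eq_getElem_cons hm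
  simp only [hk1, hbg]
  by_cases h2 : ((textL.drop m).take 2).length = 2
  · rw [if_pos h2]
    rcases hp with hp1 | hp2
    · -- length-1 query: only the char-key modify can hit
      obtain ⟨c, rfl⟩ := List.length_eq_one_iff.mp hp1
      have hne : [c] ≠ (textL.drop m).take 2 := by
        intro he
        have := congrArg List.length he
        simp only [List.length_cons, List.length_nil] at this
        omega
      rw [PySem.Dict.getD_modify_of_ne _ _ _ hne]
      by_cases he : c = textL[m]
      · subst he
        rw [PySem.Dict.getD_modify_self]
        rw [if_pos (by rw [hdropcons]; exact List.cons_prefix_cons.mpr ⟨rfl, List.nil_prefix⟩)]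
      · rw [PySem.Dict.getD_modify_of_ne _ _ _ (by simpa using he)]
        rw [if_neg (by rw [hdropcons]; intro h; exact he (List.cons_prefix_cons.mp h).1)]
        simp
    · -- length-2 query: only the bigram modify can hit
      have hne1 : p ≠ [textL[m]] := by
        intro he; rw [he] at hp2; simp at hp2
      by_cases he : p = (textL.drop m).take 2
      · rw [he, PySem.Dict.getD_modify_self,
          PySem.Dict.getD_modify_of_ne _ _ _ (he ▸ hne1 : (textL.drop m).take 2 ≠ [textL[m]]),
          if_pos (List.take_prefix 2 _)]
      · rw [PySem.Dict.getD_modify_of_ne _ _ _ he,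
          PySem.Dict.getD_modify_of_ne _ _ _ hne1]
        rw [if_neg (by
          intro h
          apply he
          have := List.prefix_iff_eq_take.mp h
          rwa [hp2] at this)]
        simp
  · rw [if_neg h2]
    -- here only one character of textL is left: drop m = [textL[m]]
    have hlen1 : (textL.drop m).length = 1 := by
      have : (textL.drop m).length = textL.length - m := List.length_drop ..
      have h2' : min 2 (textL.drop m).length ≠ 2 := by
        simpa [List.length_take] using h2
      omega
    have hdrop : textL.drop m = [textL[m]] := by
      rw [hdropcons]
      have : (textL.drop (m + 1)).length = 0 := by
        have := List.length_drop (l := textL) (i := m)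
        have := List.length_drop (l := textL) (i := m + 1)
        omega
      simp [List.length_eq_zero_iff.mp this]
    rcases hp with hp1 | hp2
    · obtain ⟨c, rfl⟩ := List.length_eq_one_iff.mp hp1
      by_cases he : c = textL[m]
      · subst he
        rw [PySem.Dict.getD_modify_self, if_pos (by rw [hdrop])]
      · rw [PySem.Dict.getD_modify_of_ne _ _ _ (by simpa using he),
          if_neg (by rw [hdrop]; intro h; exact he (List.cons_prefix_cons.mp h).1)]
        simp
    · rw [PySem.Dict.getD_modify_of_ne _ _ _ (by
        intro he; rw [he] at hp2; simp at hp2)]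
      rw [if_neg (by intro h; have := h.length_le; omega)]
      simp

theorem buildPos_getD (textL : List Char) (p : List Char)
    (hp : p.length = 1 ∨ p.length = 2) :
    (buildPos textL).getD p [] = occUpTo textL p textL.length := by
  suffices H : ∀ m : Nat, m ≤ textL.length →
      ((PySem.List.pyRange 0 (m : Int)).foldl (fun d j =>
        let d1 := d.modify (pvStrAt textL j) [] (fun l => l ++ [j])
        let bg := PySem.List.slice textL (some j) (some (j + 2))
        if bg.length = 2 then d1.modify bg [] (fun l => l ++ [j]) else d1)
        PySem.Dict.empty).getD p [] = occUpTo textL p m by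
    exact H textL.length le_rfl
  intro m
  induction m with
  | zero =>
    intro _
    rw [PySem.List.pyRange_one_eq_nil (by norm_num)]
    simp [occUpTo, PySem.Dict.getD_empty]
  | succ m ih =>
    intro hm1
    have : ((m + 1 : Nat) : Int) = (m : Int) + 1 := by push_cast; ring
    rw [this, PySem.List.pyRange_one_succ_right (by positivity), List.foldl_append]
    simp only [List.foldl_cons, List.foldl_nil]
    rw [buildPos_step textL _ m (by omega) p hp, ih (by omega), occUpTo_succ]

theorem firstGeGo_spec (lst : List Int) (lo : Int) (a b : Nat)
    (hsort : lst.Pairwise (· < ·)) (hab : a ≤ b) (hb : b ≤ lst.length)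
    (hlow : ∀ k, k < a → lst.getD k 0 < lo)
    (hhigh : ∀ k, b ≤ k → k < lst.length → lo ≤ lst.getD k 0) :
    (∀ k, k < firstGeGo lst lo a b → lst.getD k 0 < lo) ∧
    (∀ k, firstGeGo lst lo a b ≤ k → k < lst.length → lo ≤ lst.getD k 0) ∧
    firstGeGo lst lo a b ≤ lst.length := by
  have hmono : ∀ i j, i < j → j < lst.length → lst.getD i 0 < lst.getD j 0 := by
    intro i j hij hj
    have := List.pairwise_iff_getElem.mp hsort i j (hij.trans hj) hj hij
    rwa [List.getD_eq_getElem lst 0 (hij.trans hj), List.getD_eq_getElem lst 0 hj]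
  clear hsort
  revert hab hb hlow hhigh
  induction a, b using firstGeGo.induct lst lo with
  | case1 a b h m hlt ih =>
    intro hab hb hlow hhigh
    rw [firstGeGo]; simp only [h, dite_true]; rw [if_pos hlt]
    refine ih (by omega) hb ?_ hhigh
    intro k hk
    rcases Nat.lt_succ_iff_lt_or_eq.mp hk with hk' | hk'
    · exact (hmono k m hk' (by omega)).trans hlt
    · subst hk'; exact hlt
  | case2 a b h m hge ih =>
    intro hab hb hlow hhigh
    rw [firstGeGo]; simp only [h, dite_true]; rw [if_neg hge]
    refine ih (by omega) (by omega) hlow ?_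
    intro k hk hklen
    rcases Nat.eq_or_lt_of_le hk with rfl | hk'
    · omega
    · exact (le_of_not_gt hge).trans (hmono m k hk' hklen).le
  | case3 a b h =>
    intro hab hb hlow hhigh
    rw [firstGeGo]; simp only [h, dite_false]
    exact ⟨hlow, fun k hk hklen => hhigh k (by omega) hklen, by omega⟩

theorem findFrom_found_facts (textL p : List Char) (hp : p ≠ []) (k : Nat)
    (hk : k ≤ textL.length) (h : PySem.Chars.findFrom textL p (k : Int) ≠ -1) :
    0 ≤ PySem.Chars.findFrom textL p (k : Int) ∧
    (PySem.Chars.findFrom textL p (k : Int)).toNat < textL.length := by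
  obtain ⟨h1, h2, h3⟩ := PySem.Chars.findFrom_natCast_spec textL p k hk h
  have h0 : (0:Int) ≤ PySem.Chars.findFrom textL p (k : Int) := le_trans (by positivity) h1
  refine ⟨h0, ?_⟩
  by_contra hlen
  push Not at hlen
  rw [List.drop_eq_nil_of_le hlen] at h2
  exact hp (List.prefix_nil.mp h2)

-- binary search over the occurrence list computes text.find(p, k)
theorem firstGe_occ (textL p : List Char) (hp : p ≠ []) (k : Nat) (hk : k ≤ textL.length) :
    firstGe (occUpTo textL p textL.length) (k : Int) = PySem.Chars.findFrom textL p (k : Int) := by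
  set n := textL.length with hn
  set occ := occUpTo textL p n with hocc
  have hsort := occUpTo_sorted textL p n
  obtain ⟨H1, H2, H3⟩ := firstGeGo_spec occ (k : Int) 0 occ.length hsort (Nat.zero_le _) le_rfl
    (by omega) (by intro t ht htl; omega)
  set r := firstGeGo occ (k : Int) 0 occ.length with hr
  have hmono : ∀ i j (hi : i < occ.length) (hj : j < occ.length), i ≤ j → occ[i] ≤ occ[j] := by
    intro i j hi hj hij
    rcases Nat.eq_or_lt_of_le hij with rfl | hlt
    · exact le_refl _
    · exact (List.pairwise_iff_getElem.mp hsort i j hi hj hlt).le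
  rw [firstGe]
  by_cases hrl : r < occ.length
  · simp only [← hr, dif_pos hrl]
    have hjmem : occ[r] ∈ occ := List.getElem_mem hrl
    obtain ⟨jm, hje, hjlt, hjpre⟩ := (mem_occUpTo textL p n occ[r]).mp hjmem
    have hjk : (k : Int) ≤ occ[r] := by
      have := H2 r le_rfl hrl
      rwa [List.getD_eq_getElem occ 0 hrl] at this
    have hinfix : p <:+: textL.drop k := by
      have hkjm : k ≤ jm := by omega
      have : textL.drop jm = (textL.drop k).drop (jm - k) := by
        rw [List.drop_drop]; congr 1; omega
      rw [this] at hjpre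
      exact hjpre.isInfix.trans (List.drop_suffix _ _).isInfix
    have hne : PySem.Chars.findFrom textL p (k : Int) ≠ -1 := by
      rw [ne_eq, PySem.Chars.findFrom_natCast_eq_neg_one_iff textL p k hk]
      simpa using hinfix
    obtain ⟨hf1, hf2, hf3⟩ := PySem.Chars.findFrom_natCast_spec textL p k hk hne
    set f := PySem.Chars.findFrom textL p (k : Int) with hfdef
    have hf0 : (0:Int) ≤ f := le_trans (by positivity) hf1
    have hfn : f.toNat < n := by
      by_contra hc
      push Not at hc
      rw [List.drop_eq_nil_of_le hc] at hf2
      exact hp (List.prefix_nil.mp hf2)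
    have hfmem : (f.toNat : Int) ∈ occ := (mem_occUpTo textL p n _).mpr ⟨f.toNat, rfl, hfn, hf2⟩
    obtain ⟨t, ht, hte⟩ := List.getElem_of_mem hfmem
    have htr : r ≤ t := by
      by_contra hc
      push Not at hc
      have := H1 t hc
      rw [List.getD_eq_getElem occ 0 ht, hte] at this
      omega
    have hle1 : occ[r] ≤ f := by
      have := hmono r t hrl ht htr
      rw [hte] at this
      omega
    have hle2 : f ≤ occ[r] := by
      by_contra hc
      push Not at hc
      have hjmf : jm < f.toNat := by omega
      exact hf3 jm (by omega) hjmf hjpre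
    omega
  · simp only [← hr, dif_neg hrl]
    symm
    rw [PySem.Chars.findFrom_natCast_eq_neg_one_iff textL p k hk]
    intro hinf
    obtain ⟨j', hj'⟩ := (PySem.Chars.exists_prefix_drop_iff_isIn p (textL.drop k)).mpr
      ((PySem.Chars.isIn_iff_infix p (textL.drop k)).mpr hinf)
    rw [List.drop_drop] at hj'
    have hlt : k + j' < n := by
      by_contra hc
      push Not at hc
      rw [List.drop_eq_nil_of_le hc] at hj'
      exact hp (List.prefix_nil.mp hj')
    have hmem : ((k + j' : Nat) : Int) ∈ occ := (mem_occUpTo textL p n _).mpr ⟨k + j', rfl, hlt, hj'⟩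
    obtain ⟨t, ht, hte⟩ := List.getElem_of_mem hmem
    have := H1 t (by omega)
    rw [List.getD_eq_getElem occ 0 ht, hte] at this
    push_cast at this
    omega

theorem loop_eq (subL textL : List Char) (i : Nat) (hi : i ≤ subL.length)
    (rating last : Int) (h1 : -1 ≤ last) (h2 : last + 1 ≤ (textL.length : Int)) :
    fuzzyLoopA subL textL (subL.length : Int) (PySem.List.pyRange (i : Int) (subL.length : Int))
      rating last
    = fuzzyLoopB subL (buildPos textL) (subL.length : Int)
      (PySem.List.pyRange (i : Int) (subL.length : Int)) rating last := by
  generalize hd : subL.length - i = d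
  induction d generalizing i rating last with
  | zero =>
    have hieq : i = subL.length := by omega
    subst hieq
    rw [PySem.List.pyRange_one_eq_nil le_rfl]
    simp [fuzzyLoopA, fuzzyLoopB]
  | succ d ih =>
    have hilt : i < subL.length := by omega
    rw [PySem.List.pyRange_one_cons (by exact_mod_cast hilt)]
    have hcast : (i : Int) + 1 = ((i + 1 : Nat) : Int) := by push_cast; ring
    have hk : (last + 1).toNat ≤ textL.length := by omega
    have hlastcast : last + 1 = (((last + 1).toNat : Nat) : Int) := by omega
    have hkey2 : pvStrAt subL (i : Int) = [subL[i]] := pvStrAt_natCast subL i hilt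
    have hf2eq : firstGe ((buildPos textL).getD [subL[i]] []) (last + 1)
        = PySem.Chars.findFrom textL [subL[i]] (last + 1) := by
      rw [buildPos_getD textL _ (Or.inl rfl), hlastcast,
        firstGe_occ textL _ (by simp) _ hk]
    by_cases hn2 : (2 : Int) ≤ (subL.length : Int)
    · have hcondA : (subL.length : Int) ≥ 2 ∧ (i : Int) < (subL.length : Int) :=
        ⟨hn2, by exact_mod_cast hilt⟩
      have hslice2 : PySem.List.slice subL (some (i : Int)) (some ((i : Int) + 2))
          = (subL.drop i).take 2 := by
        have := PySem.List.slice_natCast_add subL i 2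
        norm_num at this
        exact this
      set pr := (subL.drop i).take 2 with hpr
      have h_if : (if (subL.length : Int) = 2 then subL.drop i else pr) = pr := by
        by_cases h : (subL.length : Int) = 2
        · rw [if_pos h]
          have hn2' : subL.length = 2 := by exact_mod_cast h
          exact (List.take_of_length_le (by simp [hn2'])).symm
        · rw [if_neg h]
      have hprlen : pr.length = 1 ∨ pr.length = 2 := by
        rw [hpr, List.length_take, List.length_drop]
        omega
      have hprne : pr ≠ [] := by
        intro h
        have := congrArg List.length h
        rw [hpr] at this
        simp only [List.length_take, List.length_drop, List.length_nil] at this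
        omega
      have hfeq : firstGe ((buildPos textL).getD pr []) (last + 1)
          = PySem.Chars.findFrom textL pr (last + 1) := by
        rw [buildPos_getD textL pr hprlen, hlastcast, firstGe_occ textL pr hprne _ hk]
      simp only [fuzzyLoopA, fuzzyLoopB, PySem.List.slice_from_natCast, hslice2, hkey2]
      rw [if_pos hcondA, if_pos (show (subL.length : Int) ≥ 2 from hn2)]
      rw [h_if, hfeq, hf2eq]
      by_cases hf : PySem.Chars.findFrom textL pr (last + 1) = -1
      · rw [if_neg (not_not_intro hf), if_neg (not_not_intro hf)]
        by_cases hf2 : PySem.Chars.findFrom textL [subL[i]] (last + 1) = -1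
        · rw [if_neg (not_not_intro hf2), if_neg (not_not_intro hf2)]
        · rw [if_pos hf2, if_pos hf2]
          obtain ⟨hge, hlt⟩ := findFrom_found_facts textL [subL[i]] (by simp)
            (last + 1).toNat hk (by rw [← hlastcast]; exact hf2)
          rw [← hlastcast] at hge hlt
          rw [hcast]
          exact ih (i + 1) (by omega) _ _ (by omega) (by omega) (by omega)
      · rw [if_pos hf, if_pos hf]
        obtain ⟨hge, hlt⟩ := findFrom_found_facts textL pr hprne
          (last + 1).toNat hk (by rw [← hlastcast]; exact hf)
        rw [← hlastcast] at hge hlt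
        rw [hcast]
        exact ih (i + 1) (by omega) _ _ (by omega) (by omega) (by omega)
    · have hcondA : ¬((subL.length : Int) ≥ 2 ∧ (i : Int) < (subL.length : Int)) := by
        intro h; exact hn2 h.1
      simp only [fuzzyLoopA, fuzzyLoopB, hkey2]
      rw [if_neg hcondA, if_neg (show ¬(subL.length : Int) ≥ 2 from hn2)]
      rw [hf2eq]
      by_cases hf2 : PySem.Chars.findFrom textL [subL[i]] (last + 1) = -1
      · rw [if_neg (not_not_intro hf2), if_neg (not_not_intro hf2)]
        rw [hcast]
        exact ih (i + 1) (by omega) _ _ h1 h2 (by omega)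
      · rw [if_pos hf2, if_pos hf2]
        obtain ⟨hge, hlt⟩ := findFrom_found_facts textL [subL[i]] (by simp)
          (last + 1).toNat hk (by rw [← hlastcast]; exact hf2)
        rw [← hlastcast] at hge hlt
        rw [hcast]
        exact ih (i + 1) (by omega) _ _ (by omega) (by omega) (by omega)

-- ===== VERDICT (by name: the statement is the Claim_ definition above) =====
theorem fuzzy_spec : Claim_equal_fuzzy := by
  intro sub text _
  unfold Spec_fuzzy fuzzy fuzzy_alt
  simpa using loop_eq sub.toList text.toList 0 (by omega) 0 (-1) (by omega) (by omega)
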